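-- pv_equiv track=rewrite | github.com/johnsonice/Chatbot_seq2seq | data_helper.py | context_answers
-- ===== SOURCE A (Python) =====
-- def context_answers(convos,id2line):
--     context,answers = [],[]
--     for convo in convos:
--         for index,line in enumerate(convo[:-1]):
--             context.append([id2line[line] for line in convo[:index+1]])
--             answers.append(id2line[convo[index+1]])
--
--     assert len(context) == len(answers)
--     return context,answers
-- ===== SOURCE B (Python) =====
-- def context_answers(convos, id2line):
--     pairs = []
--     for convo in convos:
--         prefix = []
--         for cur, nxt in zip(convo, convo[1:]):
--             prefix = prefix + [id2line[cur]]
--             pairs.append((prefix, id2line[nxt]))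
--     context = [p for p, _ in pairs]
--     answers = [a for _, a in pairs]
--     assert len(context) == len(answers)
--     return context, answers
-- ===== Notes on version B (the rewrite author's own statement) =====
-- stated objective: alternative
-- what changed: B replaces A's index loop that re-maps every prefix convo[:index+1] through id2line by a single pairwise pass zipping each conversation with its own tail while growing a running mapped prefix, collecting (prefix, answer) pairs and unzipping them at the end; each line is looked up once instead of O(len) times.
import Mathlib
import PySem

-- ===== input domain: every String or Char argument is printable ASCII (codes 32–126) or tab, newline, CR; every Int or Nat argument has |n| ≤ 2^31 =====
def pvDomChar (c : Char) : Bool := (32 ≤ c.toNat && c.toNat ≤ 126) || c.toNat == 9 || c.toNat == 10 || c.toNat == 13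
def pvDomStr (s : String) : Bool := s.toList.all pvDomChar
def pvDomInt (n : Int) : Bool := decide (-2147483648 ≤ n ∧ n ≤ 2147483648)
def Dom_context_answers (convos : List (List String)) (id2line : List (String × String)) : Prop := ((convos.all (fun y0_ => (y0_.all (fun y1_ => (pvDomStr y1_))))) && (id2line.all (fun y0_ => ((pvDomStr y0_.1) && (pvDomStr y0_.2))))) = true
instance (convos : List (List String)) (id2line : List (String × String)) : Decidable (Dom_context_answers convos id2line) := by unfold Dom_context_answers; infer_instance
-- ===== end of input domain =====

-- B walks each conversation once, zipping it with its tail and growing a running mapped prefix,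
-- collecting (context, answer) pairs and unzipping them at the end, instead of A's index loop
-- that re-maps every prefix slice through id2line.

-- ===== PORT A =====
def context_answers (convos : List (List String)) (id2line : List (String × String)) : List (List String) × List String :=
  -- context,answers = [],[]; nested for-loops; the final assert always holds and the pair is returned
  convos.foldl (fun (st : List (List String) × List String) convo =>
    (PySem.List.enumerate (PySem.List.slice convo none (some (-1)))).foldl
      (fun (st : List (List String) × List String) p =>
        (st.1 ++ [(PySem.List.slice convo none (some (p.1 + 1))).map
                    (fun line => (PySem.Dict.get? (PySem.Dict.mk id2line) line).getD "")],   -- id2line[line]; Pre_ guarantees the key is present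
         st.2 ++ [(PySem.Dict.get? (PySem.Dict.mk id2line) (PySem.List.pyGetD convo (p.1 + 1) "")).getD ""])) st)
    ([], [])

-- ===== PORT B =====
def context_answers_alt (convos : List (List String)) (id2line : List (String × String)) : List (List String) × List String :=
  -- pairs = []; per conversation: running prefix over zip(convo, convo[1:]); finally unzip; assert always holds
  let pairs := convos.foldl
    (fun (ps : List (List String × String)) convo =>
      ((convo.zip (PySem.List.slice convo (some 1) none)).foldl
        (fun (st : List String × List (List String × String)) cn =>
          let pre := st.1 ++ [(PySem.Dict.get? (PySem.Dict.mk id2line) cn.1).getD ""]   -- id2line[cur]; Pre_ guarantees the key is present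
          (pre, st.2 ++ [(pre, (PySem.Dict.get? (PySem.Dict.mk id2line) cn.2).getD "")])) -- id2line[nxt]
        ([], ps)).2)
    []
  (pairs.map Prod.fst, pairs.map Prod.snd)

-- ===== PRECONDITION & SPEC =====
-- Pre_ excludes exactly the inputs where Python A raises KeyError: a conversation of length ≥ 2
-- containing a line id absent from id2line (conversations of length < 2 perform no lookups).
def Pre_context_answers (convos : List (List String)) (id2line : List (String × String)) : Prop :=
  ∀ convo ∈ convos, 2 ≤ convo.length → ∀ x ∈ convo, (PySem.Dict.get? (PySem.Dict.mk id2line) x).isSome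
instance (convos : List (List String)) (id2line : List (String × String)) : Decidable (Pre_context_answers convos id2line) := by unfold Pre_context_answers; infer_instance
def pvWitness_context_answers : List (List String) × (List (String × String)) :=
  ([["a", "b", "c"], ["d"]], [("a", "hi"), ("b", "yo"), ("c", "ok")])

def Spec_context_answers (convos : List (List String)) (id2line : List (String × String)) (out : List (List String) × List String) : Prop := out = context_answers_alt convos id2line
instance (convos : List (List String)) (id2line : List (String × String)) (out : List (List String) × List String) : Decidable (Spec_context_answers convos id2line out) := by unfold Spec_context_answers; infer_instance

-- ===== CLAIM (what is proved, stated in full; the proofs are below) =====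
def Claim_equal_context_answers : Prop := ∀ (convos : List (List String)) (id2line : List (String × String)), Dom_context_answers convos id2line → Pre_context_answers convos id2line → Spec_context_answers convos id2line (context_answers convos id2line)

-- ===== LEMMAS AND PROOFS =====

-- the common items produced per conversation: (mapped prefix so far, mapped next line)
def specRec (L : String → String) : List String → List String → List (List String × String)
  | pre, a :: b :: rest => (pre ++ [L a], L b) :: specRec L (pre ++ [L a]) (b :: rest)
  | _, _ => []

theorem binner_eq (L : String → String) (c pre : List String)
    (ps : List (List String × String)) :
    (c.zip (PySem.List.slice c (some 1) none)).foldl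
      (fun (st : List String × List (List String × String)) cn =>
        let pre := st.1 ++ [L cn.1]
        (pre, st.2 ++ [(pre, L cn.2)])) (pre, ps)
    = (pre ++ c.dropLast.map L, ps ++ specRec L pre c) := by
  induction c generalizing pre ps with
  | nil => simp [specRec]
  | cons a c' ih =>
    cases c' with
    | nil => simp [specRec, PySem.List.slice_from_one]
    | cons b rest =>
      rw [PySem.List.slice_from_one] at ih ⊢
      simp only [List.tail_cons] at ih
      simp only [List.tail_cons, List.zip_cons_cons, List.foldl_cons]
      rw [ih]
      simp [specRec]

theorem specRec_range (L : String → String) (c pre : List String) :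
    specRec L pre c
    = (List.range (c.length - 1)).map
        (fun i => (pre ++ (c.take (i + 1)).map L, L (c.getD (i + 1) ""))) := by
  induction c generalizing pre with
  | nil => simp [specRec]
  | cons a c' ih =>
    cases c' with
    | nil => simp [specRec]
    | cons b rest =>
      simp only [specRec, List.length_cons, Nat.add_sub_cancel, List.range_succ_eq_map,
        List.map_cons, List.map_map]
      congr 1
      rw [ih]
      simp only [List.length_cons, Nat.add_sub_cancel]
      apply List.map_congr_left
      intro i _
      simp [Function.comp, List.append_assoc, Nat.succ_eq_add_one, List.getD]

-- A's inner loop body, split into two independent append streams, yields the same items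
theorem aitems_ctx (L : String → String) (c : List String) :
    (PySem.List.enumerate c.dropLast).map
      (fun p => (PySem.List.slice c none (some (p.1 + 1))).map L)
    = (List.range (c.length - 1)).map (fun i => (c.take (i + 1)).map L) := by
  rw [PySem.List.enumerate_eq_map_pyRange _ "", List.map_map]
  rw [PySem.List.pyRange_one, List.map_map]
  simp only [PySem.List.len_eq, List.length_dropLast, Int.sub_zero, Int.toNat_natCast]
  apply List.map_congr_left
  intro k _
  have : ((0 : Int) + k) + 1 = ((k + 1 : Nat) : Int) := by push_cast; omega
  simp only [Function.comp, this]
  rw [PySem.List.slice_to _ (by positivity)]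
  simp

theorem aitems_ans (L : String → String) (c : List String) :
    (PySem.List.enumerate c.dropLast).map
      (fun p => L (PySem.List.pyGetD c (p.1 + 1) ""))
    = (List.range (c.length - 1)).map (fun i => L (c.getD (i + 1) "")) := by
  rw [PySem.List.enumerate_eq_map_pyRange _ "", List.map_map]
  rw [PySem.List.pyRange_one, List.map_map]
  simp only [PySem.List.len_eq, List.length_dropLast, Int.sub_zero, Int.toNat_natCast]
  apply List.map_congr_left
  intro k _
  have : ((0 : Int) + k) + 1 = ((k + 1 : Nat) : Int) := by push_cast; omega
  simp only [Function.comp, this, PySem.List.pyGetD_natCast]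

-- A's inner fold equals appending the specRec items componentwise
theorem ainner_eq (L : String → String) (c : List String)
    (st : List (List String) × List String) :
    (PySem.List.enumerate (PySem.List.slice c none (some (-1)))).foldl
      (fun (st : List (List String) × List String) p =>
        (st.1 ++ [(PySem.List.slice c none (some (p.1 + 1))).map L],
         st.2 ++ [L (PySem.List.pyGetD c (p.1 + 1) "")])) st
    = (st.1 ++ (specRec L [] c).map Prod.fst, st.2 ++ (specRec L [] c).map Prod.snd) := by
  obtain ⟨C, A⟩ := st
  rw [PySem.List.slice_to_neg_one]
  have h := PySem.List.foldl_prod_mk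
    (fun (acc : List (List String)) (p : Int × String) =>
      acc ++ [(PySem.List.slice c none (some (p.1 + 1))).map L])
    (fun (acc : List String) (p : Int × String) =>
      acc ++ [L (PySem.List.pyGetD c (p.1 + 1) "")])
    (PySem.List.enumerate c.dropLast) C A
  refine h.trans ?_
  rw [PySem.List.foldl_append_singleton_eq_map, PySem.List.foldl_append_singleton_eq_map,
    aitems_ctx L c, aitems_ans L c, specRec_range, List.map_map, List.map_map]
  simp [Function.comp]

-- the main induction over the list of conversations
theorem outer_eq (L : String → String) (convos : List (List String))
    (ps : List (List String × String)) :
    convos.foldl (fun (st : List (List String) × List String) c =>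
      (PySem.List.enumerate (PySem.List.slice c none (some (-1)))).foldl
        (fun (st : List (List String) × List String) p =>
          (st.1 ++ [(PySem.List.slice c none (some (p.1 + 1))).map L],
           st.2 ++ [L (PySem.List.pyGetD c (p.1 + 1) "")])) st)
      (ps.map Prod.fst, ps.map Prod.snd)
    = (let P := convos.foldl (fun ps c =>
          ((c.zip (PySem.List.slice c (some 1) none)).foldl
            (fun (st : List String × List (List String × String)) cn =>
              let pre := st.1 ++ [L cn.1]
              (pre, st.2 ++ [(pre, L cn.2)])) ([], ps)).2) ps
       (P.map Prod.fst, P.map Prod.snd)) := by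
  induction convos generalizing ps with
  | nil => rfl
  | cons c cs ih =>
    simp only [List.foldl_cons]
    rw [binner_eq, ainner_eq]
    have h1 : ps.map Prod.fst ++ (specRec L [] c).map Prod.fst
        = (ps ++ specRec L [] c).map Prod.fst := by simp
    have h2 : ps.map Prod.snd ++ (specRec L [] c).map Prod.snd
        = (ps ++ specRec L [] c).map Prod.snd := by simp
    rw [h1, h2, ih]

-- ===== VERDICT (by name: the statement is the Claim_ definition above) =====
theorem context_answers_spec : Claim_equal_context_answers := by
  intro convos id2line _ _
  unfold Spec_context_answers context_answers context_answers_alt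
  exact outer_eq (fun x => (PySem.Dict.get? (PySem.Dict.mk id2line) x).getD "") convos []
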